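-- pv_equiv track=rewrite | github.com/JustinTSmith/personal-scripts | security_council/lib/ai_analysis.py | aggregate_evidence
-- ===== SOURCE A (Python) =====
-- from typing import List
--
-- def aggregate_evidence(check_results: List[dict]) -> str:
--     """Combine evidence from all collectors into a structured briefing."""
--     sections: dict = {}
--     for r in check_results:
--         section = r.get("section", "Unknown")
--         if section not in sections:
--             sections[section] = []
--         evidence = r.get("evidence", "")
--         detail = r.get("detail", "")
--         label = r.get("label", "")
--         status = r.get("status", "ok")
--         severity = r.get("severity", "")
--
--         if evidence:
--             sections[section].append(evidence)
--         elif detail and status in ("warn", "fail"):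
--             sections[section].append(f"[{severity or status}] {label}: {detail}")
--
--     parts = []
--     for section, items in sections.items():
--         parts.append(f"## {section}")
--         # Deduplicate
--         seen = set()
--         for item in items:
--             if item not in seen:
--                 seen.add(item)
--                 parts.append(item)
--         parts.append("")
--
--     full = "\n".join(parts)
--     return full[:8000]  # hard cap
-- ===== SOURCE B (Python) =====
-- def _format_item(r):
--     evidence = r.get("evidence", "")
--     if evidence:
--         return evidence
--     detail = r.get("detail", "")
--     status = r.get("status", "ok")
--     if detail and status in ("warn", "fail"):
--         severity = r.get("severity", "")
--         return f"[{severity or status}] {r.get('label', '')}: {detail}"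
--     return None
--
-- def aggregate_evidence(check_results):
--     """Combine evidence from all collectors into a structured briefing."""
--     # Stage 1: format every record once into (section, item-or-None).
--     rows = [(r.get("section", "Unknown"), _format_item(r)) for r in check_results]
--     # Stage 2: section order = first occurrence.
--     order = []
--     for sec, _ in rows:
--         if sec not in order:
--             order.append(sec)
--     # Stage 3: one block per section, scanning rows; dedup by membership in the block itself.
--     parts = []
--     for sec in order:
--         block = []
--         for s, item in rows:
--             if s == sec and item is not None and item not in block:
--                 block.append(item)
--         parts.append(f"## {sec}")
--         parts.extend(block)
--         parts.append("")
--     return "\n".join(parts)[:8000]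
-- ===== Notes on version B (the rewrite author's own statement) =====
-- stated objective: alternative
-- what changed: B drops the grouping dict entirely: it formats each record once into a (section, item) row, derives the section order by a first-occurrence scan, then builds each section's block by re-scanning the rows, deduplicating by membership in the block under construction instead of A's dict-of-lists plus seen-set pass.
import Mathlib
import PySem

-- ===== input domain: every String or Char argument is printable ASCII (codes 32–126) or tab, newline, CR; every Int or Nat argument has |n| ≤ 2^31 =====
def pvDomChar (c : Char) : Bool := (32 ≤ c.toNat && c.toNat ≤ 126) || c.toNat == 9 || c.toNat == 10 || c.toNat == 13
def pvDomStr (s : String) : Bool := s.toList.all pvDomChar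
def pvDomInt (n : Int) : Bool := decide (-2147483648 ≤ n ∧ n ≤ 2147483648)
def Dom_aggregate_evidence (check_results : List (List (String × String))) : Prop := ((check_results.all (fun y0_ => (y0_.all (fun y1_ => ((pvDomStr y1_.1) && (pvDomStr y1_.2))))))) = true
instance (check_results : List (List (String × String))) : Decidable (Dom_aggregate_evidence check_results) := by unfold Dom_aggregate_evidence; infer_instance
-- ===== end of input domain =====

-- B replaces A's dict-of-lists grouping + seen-set dedup by a staged format-then-rescan
-- algorithm (no dict at all); same return value, similar cost on typical inputs.

-- ===== PORT A =====
def aggregate_evidence (check_results : List (List (String × String))) : String :=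
  let sections : PySem.Dict String (List String) :=
    check_results.foldl (fun sections r =>
      let d := PySem.Dict.ofList r
      let sec := d.getD "section" "Unknown"
      let sections := if sections.contains sec then sections else sections.insert sec ([] : List String)
      let evidence := d.getD "evidence" ""
      let detail := d.getD "detail" ""
      let label := d.getD "label" ""
      let status := d.getD "status" "ok"
      let severity := d.getD "severity" ""
      if evidence ≠ "" then
        sections.insert sec (sections.getD sec [] ++ [evidence])
      else if detail ≠ "" ∧ (status = "warn" ∨ status = "fail") then
        sections.insert sec (sections.getD sec [] ++
          ["[" ++ (if severity ≠ "" then severity else status) ++ "] " ++ label ++ ": " ++ detail])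
      else sections) PySem.Dict.empty
  let parts : List String :=
    sections.items.foldl (fun parts p =>
      let parts := parts ++ ["## " ++ p.1]
      let st := p.2.foldl (fun (st : PySem.Set String × List String) item =>
          if PySem.Set.contains st.1 item then st
          else (PySem.Set.add st.1 item, st.2 ++ [item])) (PySem.Set.empty, parts)
      st.2 ++ [""]) []
  PySem.Str.slice (PySem.Str.join "\n" parts) none (some 8000)

-- ===== PORT B =====
-- B-side helper: _format_item
def pvFmtB (r : List (String × String)) : Option String :=
  let d := PySem.Dict.ofList r
  let evidence := d.getD "evidence" ""
  if evidence ≠ "" then some evidence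
  else
    let detail := d.getD "detail" ""
    let status := d.getD "status" "ok"
    if detail ≠ "" ∧ (status = "warn" ∨ status = "fail") then
      let severity := d.getD "severity" ""
      some ("[" ++ (if severity ≠ "" then severity else status) ++ "] " ++
        d.getD "label" "" ++ ": " ++ detail)
    else none

def aggregate_evidence_alt (check_results : List (List (String × String))) : String :=
  let rows : List (String × Option String) :=
    check_results.map (fun r => ((PySem.Dict.ofList r).getD "section" "Unknown", pvFmtB r))
  let order : List String :=
    rows.foldl (fun order p => if p.1 ∈ order then order else order ++ [p.1]) []
  let parts : List String :=
    order.foldl (fun parts sec =>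
      let block : List String :=
        rows.foldl (fun block p =>
          match p.2 with
          | some item => if p.1 = sec ∧ item ∉ block then block ++ [item] else block
          | none => block) []
      parts ++ ["## " ++ sec] ++ block ++ [""]) []
  PySem.Str.slice (PySem.Str.join "\n" parts) none (some 8000)

-- ===== PRECONDITION & SPEC =====
def Spec_aggregate_evidence (check_results : List (List (String × String))) (out : String) : Prop := out = aggregate_evidence_alt check_results
instance (check_results : List (List (String × String))) (out : String) : Decidable (Spec_aggregate_evidence check_results out) := by unfold Spec_aggregate_evidence; infer_instance

-- ===== CLAIM (what is proved, stated in full; the proofs are below) =====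
def Claim_equal_aggregate_evidence : Prop := ∀ (check_results : List (List (String × String))), Dom_aggregate_evidence check_results → Spec_aggregate_evidence check_results (aggregate_evidence check_results)

-- ===== LEMMAS AND PROOFS =====

-- the row a record contributes in B: (its section, its formatted item if any)
def pvRow (r : List (String × String)) : String × Option String :=
  ((PySem.Dict.ofList r).getD "section" "Unknown", pvFmtB r)

-- first-occurrence order of the sections of rows
def pvOrd (rows : List (String × Option String)) : List String :=
  PySem.Set.ofList (rows.map Prod.fst)

-- the items a section collects, in row order
def pvItems (rows : List (String × Option String)) (sec : String) : List String :=
  (rows.filter (fun p => p.1 == sec)).filterMap Prod.snd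

-- the abstract value of A's sections dict after processing the records yielding rows
def pvAbs (rows : List (String × Option String)) : PySem.Dict String (List String) :=
  PySem.Dict.mk ((pvOrd rows).map (fun s => (s, pvItems rows s)))

-- A's loop body, named
def pvStepA (sections : PySem.Dict String (List String)) (r : List (String × String)) :
    PySem.Dict String (List String) :=
  let d := PySem.Dict.ofList r
  let sec := d.getD "section" "Unknown"
  let sections := if sections.contains sec then sections else sections.insert sec ([] : List String)
  let evidence := d.getD "evidence" ""
  let detail := d.getD "detail" ""
  let label := d.getD "label" ""
  let status := d.getD "status" "ok"
  let severity := d.getD "severity" ""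
  if evidence ≠ "" then
    sections.insert sec (sections.getD sec [] ++ [evidence])
  else if detail ≠ "" ∧ (status = "warn" ∨ status = "fail") then
    sections.insert sec (sections.getD sec [] ++
      ["[" ++ (if severity ≠ "" then severity else status) ++ "] " ++ label ++ ": " ++ detail])
  else sections

-- A's output-loop body, named
def pvPartA (parts : List String) (p : String × List String) : List String :=
  let parts := parts ++ ["## " ++ p.1]
  let st := p.2.foldl (fun (st : PySem.Set String × List String) item =>
      if PySem.Set.contains st.1 item then st
      else (PySem.Set.add st.1 item, st.2 ++ [item])) (PySem.Set.empty, parts)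
  st.2 ++ [""]

lemma pvStepA_eq (d : PySem.Dict String (List String)) (r : List (String × String)) :
    pvStepA d r =
      (let sec := (PySem.Dict.ofList r).getD "section" "Unknown"
       let d1 := if d.contains sec then d else d.insert sec ([] : List String)
       match pvFmtB r with
       | some x => d1.insert sec (d1.getD sec [] ++ [x])
       | none => d1) := by
  unfold pvStepA pvFmtB
  dsimp only
  split_ifs <;> rfl

lemma pv_get?_mapped (l : List String) (f : String → List String) (k : String) :
    (PySem.Dict.mk (l.map (fun s => (s, f s)))).get? k
      = if k ∈ l then some (f k) else none := by
  induction l with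
  | nil =>
    rw [List.map_nil, if_neg (List.not_mem_nil)]
    rfl
  | cons a l ih =>
    rw [List.map_cons, PySem.Dict.get?_mk_cons]
    by_cases h : a = k
    · subst h
      rw [if_pos (beq_self_eq_true a), if_pos (List.mem_cons_self)]
    · rw [if_neg (by simpa using h), ih]
      by_cases hk : k ∈ l
      · rw [if_pos hk, if_pos (List.mem_cons_of_mem _ hk)]
      · rw [if_neg hk, if_neg (by
          intro hc
          rcases List.mem_cons.mp hc with hc | hc
          · exact h hc.symm
          · exact hk hc)]

lemma pv_keys_pvAbs (rows : List (String × Option String)) :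
    (pvAbs rows).keys = pvOrd rows := by
  show ((pvOrd rows).map _).map _ = _
  rw [List.map_map]
  exact List.map_id' _

lemma pv_contains_pvAbs (rows : List (String × Option String)) (k : String) :
    (pvAbs rows).contains k = decide (k ∈ pvOrd rows) := by
  rw [PySem.Dict.contains_eq_decide_mem_keys, pv_keys_pvAbs]

lemma pv_get?_pvAbs (rows : List (String × Option String)) (k : String) :
    (pvAbs rows).get? k = if k ∈ pvOrd rows then some (pvItems rows k) else none :=
  pv_get?_mapped _ _ _

lemma pv_mem_pvOrd (rows : List (String × Option String)) (k : String) :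
    k ∈ pvOrd rows ↔ ∃ p ∈ rows, p.1 = k := by
  unfold pvOrd
  simp [PySem.Set.mem_ofList]

lemma pv_items_append (rows : List (String × Option String)) (p : String × Option String)
    (sec : String) :
    pvItems (rows ++ [p]) sec
      = pvItems rows sec ++ (if p.1 = sec then p.2.toList else []) := by
  unfold pvItems
  rw [List.filter_append, List.filterMap_append]
  congr 1
  by_cases h : p.1 = sec <;> cases hp : p.2 <;> simp [h, hp]

lemma pv_items_nil_of_not_mem (rows : List (String × Option String)) (sec : String)
    (h : sec ∉ pvOrd rows) : pvItems rows sec = [] := by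
  unfold pvItems
  rw [List.filter_eq_nil_iff.mpr, List.filterMap_nil]
  intro p hp
  simp only [beq_iff_eq]
  intro hc
  exact h ((pv_mem_pvOrd rows sec).mpr ⟨p, hp, hc⟩)

lemma pv_ord_append (rows : List (String × Option String)) (p : String × Option String) :
    pvOrd (rows ++ [p]) = PySem.Set.add (pvOrd rows) p.1 := by
  unfold pvOrd
  rw [List.map_append, List.map_cons, List.map_nil, PySem.Set.ofList_append_singleton]

lemma pv_step (rows : List (String × Option String)) (r : List (String × String)) :
    pvStepA (pvAbs rows) r = pvAbs (rows ++ [pvRow r]) := by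
  rw [pvStepA_eq]
  set sec := (PySem.Dict.ofList r).getD "section" "Unknown" with hsec
  have hrow : pvRow r = (sec, pvFmtB r) := rfl
  by_cases hm : sec ∈ pvOrd rows
  · -- section already registered
    have hc : (pvAbs rows).contains sec = true := by
      rw [pv_contains_pvAbs]; exact decide_eq_true hm
    simp only [hc, if_true]
    have hord : pvOrd (rows ++ [pvRow r]) = pvOrd rows := by
      rw [pv_ord_append, hrow, PySem.Set.add_of_mem hm]
    cases hf : pvFmtB r with
    | none =>
      apply PySem.Dict.ext
      show _ = ((pvOrd (rows ++ [pvRow r])).map _)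
      rw [hord]
      apply List.map_congr_left
      intro s _
      rw [pv_items_append, hrow, hf]
      by_cases h : sec = s <;> simp [h]
    | some x =>
      have hgd : (pvAbs rows).getD sec [] = pvItems rows sec := by
        rw [PySem.Dict.getD_eq_get?_getD, pv_get?_pvAbs, if_pos hm]; rfl
      apply PySem.Dict.ext
      rw [PySem.Dict.items_insert_of_contains _ _ hc, hgd]
      show ((pvOrd rows).map _).map _ = ((pvOrd (rows ++ [pvRow r])).map _)
      rw [hord, List.map_map]
      apply List.map_congr_left
      intro s _
      rw [pv_items_append, hrow, hf]
      by_cases h : s = sec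
      · subst h; simp
      · have h' : sec ≠ s := fun e => h e.symm
        simp [h, h']
  · -- new section: registered with an empty list first
    have hc : (pvAbs rows).contains sec = false := by
      rw [pv_contains_pvAbs]; exact decide_eq_false hm
    simp only [hc, if_false, Bool.false_eq_true]
    have hord : pvOrd (rows ++ [pvRow r]) = pvOrd rows ++ [sec] := by
      rw [pv_ord_append, hrow, PySem.Set.add_of_not_mem hm]
    have hitems : pvItems rows sec = [] := pv_items_nil_of_not_mem rows sec hm
    have hins : ((pvAbs rows).insert sec ([] : List String)).items
        = (pvOrd rows).map (fun s => (s, pvItems rows s)) ++ [(sec, [])] :=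
      PySem.Dict.items_insert_of_not_contains _ _ hc
    cases hf : pvFmtB r with
    | none =>
      apply PySem.Dict.ext
      rw [hins]
      show _ = ((pvOrd (rows ++ [pvRow r])).map _)
      rw [hord, List.map_append, List.map_cons, List.map_nil]
      congr 1
      · apply List.map_congr_left
        intro s _
        rw [pv_items_append, hrow, hf]
        by_cases h : sec = s <;> simp [h]
      · rw [pv_items_append, hrow, hf, hitems]
        simp
    | some x =>
      have hc1 : ((pvAbs rows).insert sec ([] : List String)).contains sec = true :=
        PySem.Dict.contains_insert_self _ _ _
      have hgd : ((pvAbs rows).insert sec ([] : List String)).getD sec [] = [] :=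
        PySem.Dict.getD_insert_self _ _ _ _
      apply PySem.Dict.ext
      rw [PySem.Dict.items_insert_of_contains _ _ hc1, hgd, hins]
      show _ = ((pvOrd (rows ++ [pvRow r])).map _)
      rw [hord, List.map_append, List.map_cons, List.map_nil, List.map_append,
        List.map_map, List.map_cons, List.map_nil]
      congr 1
      · apply List.map_congr_left
        intro s hs
        have h : s ≠ sec := fun e => hm (e ▸ hs)
        rw [pv_items_append, hrow, hf]
        have h' : sec ≠ s := fun e => h e.symm
        simp [h, h']
      · rw [pv_items_append, hrow, hf, hitems]
        simp

lemma pv_fold_abs (cr : List (List (String × String))) :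
    cr.foldl pvStepA PySem.Dict.empty = pvAbs (cr.map pvRow) := by
  induction cr using List.reverseRecOn with
  | nil => rfl
  | append_singleton cs r ih =>
    rw [List.foldl_append, List.foldl_cons, List.foldl_nil, ih, pv_step, List.map_append]
    rfl

lemma pv_update_len (seen : PySem.Set String) (v : List String) :
    seen.length ≤ (PySem.Set.update seen v).length := by
  rw [PySem.Set.update_eq_append_filter]
  simp

lemma pv_inner (v : List String) (seen : PySem.Set String) (parts : List String) :
    v.foldl (fun (st : PySem.Set String × List String) item =>
        if PySem.Set.contains st.1 item then st
        else (PySem.Set.add st.1 item, st.2 ++ [item])) (seen, parts)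
      = (PySem.Set.update seen v, parts ++ (PySem.Set.update seen v).drop seen.length) := by
  induction v using List.reverseRecOn with
  | nil => simp [PySem.Set.update_nil, List.drop_length]
  | append_singleton v x ih =>
    rw [List.foldl_append, ih, List.foldl_cons, List.foldl_nil]
    rw [show PySem.Set.update seen (v ++ [x]) = (PySem.Set.update seen v).add x from by
      rw [PySem.Set.update_append, PySem.Set.update_cons, PySem.Set.update_nil]]
    by_cases h : x ∈ PySem.Set.update seen v
    · rw [if_pos ((PySem.Set.contains_iff _ _).mpr h), PySem.Set.add_of_mem h]
    · rw [if_neg (by rw [PySem.Set.contains_iff]; exact h), PySem.Set.add_of_not_mem h]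
      rw [List.drop_append_of_le_length (pv_update_len seen v), List.append_assoc]

lemma pv_partA (parts : List String) (p : String × List String) :
    pvPartA parts p = parts ++ ["## " ++ p.1] ++ PySem.Set.ofList p.2 ++ [""] := by
  unfold pvPartA
  dsimp only
  rw [pv_inner]
  rw [show PySem.Set.update PySem.Set.empty p.2 = PySem.Set.ofList p.2 from
    PySem.Set.update_nil_left _]
  simp [PySem.Set.empty]

-- B's per-section scan over the rows collects exactly the deduped items of that section
lemma pv_block (rows : List (String × Option String)) (sec : String) (b : List String) :
    rows.foldl (fun block p =>
        match p.2 with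
        | some item => if p.1 = sec ∧ item ∉ block then block ++ [item] else block
        | none => block) b
      = (pvItems rows sec).foldl
          (fun block item => if item ∉ block then block ++ [item] else block) b := by
  induction rows generalizing b with
  | nil => rfl
  | cons p rows ih =>
    rw [List.foldl_cons]
    have hitems : pvItems (p :: rows) sec
        = (if p.1 = sec then p.2.toList else []) ++ pvItems rows sec := by
      unfold pvItems
      rw [List.filter_cons]
      by_cases h : p.1 = sec <;> cases hp : p.2 <;> simp [h, hp]
    cases hp2 : p.2 with
    | none => rw [ih, hitems, hp2]; by_cases h : p.1 = sec <;> simp [h]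
    | some x =>
      by_cases h : p.1 = sec
      · rw [hitems, hp2, if_pos h, Option.toList_some, List.singleton_append,
          List.foldl_cons, ih]
        by_cases hx : x ∉ b <;> simp [h, hx]
      · rw [ih, hitems, hp2, if_neg h]
        simp [h]

lemma pv_dedup_fold (v : List String) :
    v.foldl (fun block item => if item ∉ block then block ++ [item] else block) []
      = PySem.Set.ofList v := by
  rw [PySem.Set.ofList_eq_foldl]
  apply PySem.List.foldl_congr_mem
  intro b x _
  rw [PySem.Set.add_eq_ite]
  by_cases h : x ∈ b <;> simp [h]

-- ===== VERDICT (by name: the statement is the Claim_ definition above) =====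
theorem aggregate_evidence_spec : Claim_equal_aggregate_evidence := by
  intro cr _
  show aggregate_evidence cr = aggregate_evidence_alt cr
  have hA : aggregate_evidence cr =
      PySem.Str.slice (PySem.Str.join "\n"
        ((cr.foldl pvStepA PySem.Dict.empty).items.foldl pvPartA [])) none (some 8000) := rfl
  set rows := cr.map pvRow with hrows
  have hB : aggregate_evidence_alt cr =
      PySem.Str.slice (PySem.Str.join "\n"
        ((rows.foldl (fun order p => if p.1 ∈ order then order else order ++ [p.1]) []).foldl
          (fun parts sec =>
            parts ++ ["## " ++ sec] ++
              (rows.foldl (fun block p =>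
                match p.2 with
                | some item => if p.1 = sec ∧ item ∉ block then block ++ [item] else block
                | none => block) []) ++ [""]) [])) none (some 8000) := rfl
  rw [hA, hB, pv_fold_abs]
  have horder : rows.foldl (fun order p => if p.1 ∈ order then order else order ++ [p.1]) []
      = pvOrd rows := by
    have hstep : (fun (order : List String) (p : String × Option String) =>
        if p.1 ∈ order then order else order ++ [p.1])
        = fun order p => PySem.Set.add order p.1 := by
      funext order p
      rw [PySem.Set.add_eq_ite]
    rw [hstep, ← PySem.Set.update_map_eq_foldl_add, PySem.Set.update_nil_left]
    rfl
  rw [horder]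
  have hparts : List.foldl pvPartA [] (pvAbs rows).items
      = (pvOrd rows).foldl (fun parts sec =>
          parts ++ ["## " ++ sec] ++
            (rows.foldl (fun block p =>
              match p.2 with
              | some item => if p.1 = sec ∧ item ∉ block then block ++ [item] else block
              | none => block) []) ++ [""]) [] := by
    show List.foldl pvPartA [] ((pvOrd rows).map (fun s => (s, pvItems rows s))) = _
    rw [List.foldl_map]
    apply PySem.List.foldl_congr_mem
    intro parts s _
    rw [pv_partA, pv_block, pv_dedup_fold]
  rw [hparts]
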